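-- pv_equiv track=rewrite | github.com/zaiyr-sh/yandex-algorithm-training | lectures/week_3/task_2.py | wordsInDict
-- ===== SOURCE A (Python) =====
-- def wordsInDict(dictionary, text):
--     goodWords = set(dictionary)
--     for word in dictionary:
--         for delPos in range(len(word)):
--             goodWords.add(word[:delPos] + word[delPos+1:])
--     ans = []
--     for word in text:
--         ans.append(word in goodWords)
--     return ans
-- ===== SOURCE B (Python) =====
-- def wordsInDict(dictionary, text):
--     good = set(dictionary)
--     alpha = {c for d in dictionary for c in d}
--     ans = []
--     for w in text:
--         if w in good:
--             ans.append(True)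
--         else:
--             ans.append(any(w[:i] + c + w[i:] in good
--                            for i in range(len(w) + 1) for c in alpha))
--     return ans
-- ===== Notes on version B (the rewrite author's own statement) =====
-- stated objective: alternative
-- what changed: Instead of precomputing every one-deletion variant of every dictionary word into the lookup set, B keeps only the plain dictionary set plus its character alphabet and, per text word not found directly, tests whether some single-character insertion (any position, any alphabet character) lands in the dictionary.
import Mathlib
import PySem

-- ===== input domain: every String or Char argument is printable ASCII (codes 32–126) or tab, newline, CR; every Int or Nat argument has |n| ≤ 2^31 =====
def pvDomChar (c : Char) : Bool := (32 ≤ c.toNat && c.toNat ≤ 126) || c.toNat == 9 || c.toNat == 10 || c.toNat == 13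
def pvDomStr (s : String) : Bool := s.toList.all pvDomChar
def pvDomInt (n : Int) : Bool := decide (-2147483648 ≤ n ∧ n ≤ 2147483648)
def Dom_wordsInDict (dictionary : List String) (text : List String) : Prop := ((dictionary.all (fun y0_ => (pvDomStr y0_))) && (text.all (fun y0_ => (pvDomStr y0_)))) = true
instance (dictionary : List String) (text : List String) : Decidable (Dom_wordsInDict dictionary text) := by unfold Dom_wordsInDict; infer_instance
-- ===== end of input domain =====

-- B replaces A's precomputation of all one-deletion variants of the dictionary by
-- per-query single-character insertions drawn from the dictionary's own alphabet
-- (alternative decomposition, similar cost on these sizes).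

-- ===== PORT A =====
def wordsInDict (dictionary : List String) (text : List String) : List Bool :=
  let goodWords : PySem.Set String :=
    dictionary.foldl
      (fun g word =>
        (PySem.List.pyRange 0 (PySem.Str.len word)).foldl
          (fun g delPos =>
            PySem.Set.add g (String.ofList
              (PySem.List.slice word.toList none (some delPos) ++
               PySem.List.slice word.toList (some (delPos + 1)) none)))
          g)
      (PySem.Set.ofList dictionary)
  text.foldl (fun ans word => ans ++ [PySem.Set.contains goodWords word]) []

-- ===== PORT B =====
def wordsInDict_alt (dictionary : List String) (text : List String) : List Bool :=
  let good : PySem.Set String := PySem.Set.ofList dictionary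
  let alpha : PySem.Set Char :=
    dictionary.foldl (fun s d => PySem.Set.update s d.toList) PySem.Set.empty
  text.map (fun w =>
    if PySem.Set.contains good w then true
    else
      (PySem.List.pyRange 0 (PySem.Str.len w + 1)).any fun i =>
        alpha.any fun c =>
          PySem.Set.contains good (String.ofList
            (PySem.List.slice w.toList none (some i) ++ c ::
             PySem.List.slice w.toList (some i) none)))

-- ===== PRECONDITION & SPEC =====
def Spec_wordsInDict (dictionary : List String) (text : List String) (out : List Bool) : Prop := out = wordsInDict_alt dictionary text
instance (dictionary : List String) (text : List String) (out : List Bool) : Decidable (Spec_wordsInDict dictionary text out) := by unfold Spec_wordsInDict; infer_instance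

-- ===== CLAIM (what is proved, stated in full; the proofs are below) =====
def Claim_equal_wordsInDict : Prop := ∀ (dictionary : List String) (text : List String), Dom_wordsInDict dictionary text → Spec_wordsInDict dictionary text (wordsInDict dictionary text)

-- ===== LEMMAS AND PROOFS =====

-- membership in a fold of Set.add
theorem pv_mem_foldl_add {α β : Type} [BEq α] [LawfulBEq α] (f : β → α) (l : List β)
    (g : PySem.Set α) (w : α) :
    w ∈ l.foldl (fun g i => PySem.Set.add g (f i)) g ↔ w ∈ g ∨ ∃ i ∈ l, f i = w := by
  induction l generalizing g with
  | nil => simp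
  | cons x t ih =>
    simp only [List.foldl_cons, ih, PySem.Set.mem_add, List.mem_cons]
    constructor
    · rintro (⟨h | h⟩ | ⟨i, hi, h⟩)
      · exact Or.inl h
      · exact Or.inr ⟨x, Or.inl rfl, h.symm⟩
      · exact Or.inr ⟨i, Or.inr hi, h⟩
    · rintro (h | ⟨i, (rfl | hi), h⟩)
      · exact Or.inl (Or.inl h)
      · exact Or.inl (Or.inr h.symm)
      · exact Or.inr ⟨i, hi, h⟩

-- the inner loop of A over delPos, rephrased with a natural index
theorem pv_inner_exists (d w : String) :
    (∃ i ∈ PySem.List.pyRange 0 (PySem.Str.len d),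
        String.ofList (PySem.List.slice d.toList none (some i) ++
          PySem.List.slice d.toList (some (i + 1)) none) = w) ↔
    (∃ p : Nat, p < d.toList.length ∧
        String.ofList (d.toList.take p ++ d.toList.drop (p + 1)) = w) := by
  constructor
  · rintro ⟨i, hi, h⟩
    rw [PySem.List.mem_pyRange_one, PySem.Str.len_eq] at hi
    refine ⟨i.toNat, by omega, ?_⟩
    rw [PySem.List.slice_to _ hi.1, PySem.List.slice_from _ (by omega : (0:Int) ≤ i + 1)] at h
    have h1 : (i + 1).toNat = i.toNat + 1 := by omega
    rwa [h1] at h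
  · rintro ⟨p, hp, h⟩
    refine ⟨(p : Int), ?_, ?_⟩
    · rw [PySem.List.mem_pyRange_one, PySem.Str.len_eq]; omega
    · rw [PySem.List.slice_to _ (by omega : (0:Int) ≤ (p:Int)),
        PySem.List.slice_from _ (by omega : (0:Int) ≤ (p:Int) + 1)]
      have h1 : ((p : Int) + 1).toNat = p + 1 := by omega
      have h2 : ((p : Int)).toNat = p := by omega
      rw [h1, h2]; exact h

-- what A's goodWords set contains
theorem pv_mem_goodWords (l : List String) (g : PySem.Set String) (w : String) :
    w ∈ l.foldl
      (fun g word =>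
        (PySem.List.pyRange 0 (PySem.Str.len word)).foldl
          (fun g delPos =>
            PySem.Set.add g (String.ofList
              (PySem.List.slice word.toList none (some delPos) ++
               PySem.List.slice word.toList (some (delPos + 1)) none)))
          g)
      g ↔
    w ∈ g ∨ ∃ d ∈ l, ∃ p : Nat, p < d.toList.length ∧
        String.ofList (d.toList.take p ++ d.toList.drop (p + 1)) = w := by
  induction l generalizing g with
  | nil => simp
  | cons x t ih =>
    simp only [List.foldl_cons, ih, pv_mem_foldl_add, List.mem_cons]
    rw [pv_inner_exists]
    constructor
    · rintro (⟨h | h⟩ | ⟨d, hd, h⟩)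
      · exact Or.inl h
      · exact Or.inr ⟨x, Or.inl rfl, h⟩
      · exact Or.inr ⟨d, Or.inr hd, h⟩
    · rintro (h | ⟨d, (rfl | hd), h⟩)
      · exact Or.inl (Or.inl h)
      · exact Or.inl (Or.inr h)
      · exact Or.inr ⟨d, hd, h⟩

-- what B's alphabet set contains
theorem pv_mem_alpha (l : List String) (s : PySem.Set Char) (c : Char) :
    c ∈ l.foldl (fun s d => PySem.Set.update s d.toList) s ↔
      c ∈ s ∨ ∃ d ∈ l, c ∈ d.toList := by
  induction l generalizing s with
  | nil => simp
  | cons x t ih =>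
    simp only [List.foldl_cons, ih, PySem.Set.mem_update, List.mem_cons]
    constructor
    · rintro (⟨h | h⟩ | ⟨d, hd, h⟩)
      · exact Or.inl h
      · exact Or.inr ⟨x, Or.inl rfl, h⟩
      · exact Or.inr ⟨d, Or.inr hd, h⟩
    · rintro (h | ⟨d, (rfl | hd), h⟩)
      · exact Or.inl (Or.inl h)
      · exact Or.inl (Or.inr h)
      · exact Or.inr ⟨d, hd, h⟩

-- one-character deletion from ds ↔ one-character insertion into cs
theorem pv_del_insert_iff (cs ds : List Char) :
    (∃ p : Nat, p < ds.length ∧ ds.take p ++ ds.drop (p + 1) = cs) ↔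
    (∃ i : Nat, i ≤ cs.length ∧ ∃ c ∈ ds, cs.take i ++ c :: cs.drop i = ds) := by
  constructor
  · rintro ⟨p, hp, rfl⟩
    refine ⟨p, ?_, ds[p], List.getElem_mem hp, ?_⟩
    · simp; omega
    · have h1 : (ds.take p ++ ds.drop (p + 1)).take p = ds.take p := by
        rw [List.take_append_of_le_length (by simp; omega)]
        simp
      have h2 : (ds.take p ++ ds.drop (p + 1)).drop p = ds.drop (p + 1) := by
        rw [List.drop_append_of_le_length (by simp; omega)]
        simp
      rw [h1, h2, List.getElem_cons_drop, List.take_append_drop]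
  · rintro ⟨i, hi, c, _, rfl⟩
    refine ⟨i, ?_, ?_⟩
    · simp; omega
    · have h1 : (cs.take i ++ c :: cs.drop i).take i = cs.take i := by
        rw [List.take_append_of_le_length (by simp; omega)]
        simp [hi]
      have h2 : (cs.take i ++ c :: cs.drop i).drop (i + 1) = cs.drop i := by
        have : cs.take i ++ c :: cs.drop i = (cs.take i ++ [c]) ++ cs.drop i := by simp
        rw [this, List.drop_append_of_le_length (by simp; omega)]
        have : (cs.take i ++ [c]).length = i + 1 := by simp [hi]
        simp [this]
      rw [h1, h2, List.take_append_drop]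

-- the per-word booleans agree
theorem pv_word_eq (dictionary : List String) (w : String) :
    PySem.Set.contains
      (dictionary.foldl
        (fun g word =>
          (PySem.List.pyRange 0 (PySem.Str.len word)).foldl
            (fun g delPos =>
              PySem.Set.add g (String.ofList
                (PySem.List.slice word.toList none (some delPos) ++
                 PySem.List.slice word.toList (some (delPos + 1)) none)))
            g)
        (PySem.Set.ofList dictionary)) w =
    (if PySem.Set.contains (PySem.Set.ofList dictionary) w then true
     else
       (PySem.List.pyRange 0 (PySem.Str.len w + 1)).any fun i =>
         (dictionary.foldl (fun s d => PySem.Set.update s d.toList) PySem.Set.empty).any fun c =>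
           PySem.Set.contains (PySem.Set.ofList dictionary) (String.ofList
             (PySem.List.slice w.toList none (some i) ++ c ::
              PySem.List.slice w.toList (some i) none))) := by
  by_cases hw : PySem.Set.contains (PySem.Set.ofList dictionary) w = true
  · rw [if_pos hw]
    rw [PySem.Set.contains_iff] at hw ⊢
    rw [pv_mem_goodWords]
    exact Or.inl hw
  · rw [if_neg hw]
    rw [Bool.eq_iff_iff]
    rw [PySem.Set.contains_iff, pv_mem_goodWords, List.any_eq_true]
    constructor
    · rintro (h | ⟨d, hd, p, hp, h⟩)
      · exact absurd ((PySem.Set.contains_iff _ _).mpr h) hw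
      · -- turn the deletion witness into an insertion witness
        have := (pv_del_insert_iff w.toList d.toList).mp
          ⟨p, hp, by
            have := congrArg String.toList h
            rwa [String.toList_ofList] at this⟩
        obtain ⟨i, hi, c, hc, hins⟩ := this
        refine ⟨(i : Int), ?_, ?_⟩
        · rw [PySem.List.mem_pyRange_one, PySem.Str.len_eq]; omega
        · rw [List.any_eq_true]
          refine ⟨c, (pv_mem_alpha _ _ _).mpr (Or.inr ⟨d, hd, hc⟩), ?_⟩
          rw [PySem.Set.contains_iff, PySem.Set.mem_ofList,
            PySem.List.slice_to _ (by omega : (0:Int) ≤ (i:Int)),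
            PySem.List.slice_from _ (by omega : (0:Int) ≤ (i:Int))]
          have h2 : ((i : Int)).toNat = i := by omega
          rw [h2, hins, String.ofList_toList]
          exact hd
    · rintro ⟨i, hi, h⟩
      rw [List.any_eq_true] at h
      obtain ⟨c, _, h⟩ := h
      rw [PySem.List.mem_pyRange_one, PySem.Str.len_eq] at hi
      rw [PySem.Set.contains_iff, PySem.Set.mem_ofList] at h
      rw [PySem.List.slice_to _ hi.1, PySem.List.slice_from _ hi.1] at h
      -- the inserted word is in the dictionary; delete back
      refine Or.inr ⟨String.ofList
          (w.toList.take i.toNat ++ c :: w.toList.drop i.toNat), h, ?_⟩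
      have hins : w.toList.take i.toNat ++ c :: w.toList.drop i.toNat =
          (String.ofList (w.toList.take i.toNat ++ c :: w.toList.drop i.toNat)).toList := by
        rw [String.toList_ofList]
      have hi' : i.toNat ≤ w.toList.length := by omega
      have := (pv_del_insert_iff w.toList
          (String.ofList (w.toList.take i.toNat ++ c :: w.toList.drop i.toNat)).toList).mpr
        ⟨i.toNat, hi', c, by rw [String.toList_ofList]; simp, by rw [String.toList_ofList]⟩
      obtain ⟨p, hp, hdel⟩ := this
      exact ⟨p, hp, by rw [hdel, String.ofList_toList]⟩

-- ===== VERDICT (by name: the statement is the Claim_ definition above) =====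
theorem wordsInDict_spec : Claim_equal_wordsInDict := by
  intro dictionary text _
  unfold Spec_wordsInDict wordsInDict wordsInDict_alt
  rw [PySem.List.foldl_append_singleton_eq_map]
  simp only [List.nil_append]
  exact List.map_congr_left fun w _ => pv_word_eq dictionary w
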